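-- pv_equiv track=rewrite | github.com/QSOLKCB/QEC | src/qec/analysis/self_adjustment.py | resolve_recommendation_to_mode
-- ===== SOURCE A (Python) =====
-- from typing import Any, Dict, List, Optional, Tuple
--
-- _RECOMMENDATION_TO_MODE: Dict[str, str] = {
--     "prefer_d4_projection": "d4",
--     "prefer_invariant_guided_modes": "d4+inv",
--     "enable_invariant_guidance": "d4+inv",
--     "reduce_projection_strength": "square",
--     "disable_correction": "none",
--     "switch_to_d4_or_invariant": "d4+inv",
--     "increase_structure_guidance": "d4+inv",
--     "skip_correction_or_expand_input": "none",
-- }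
--
-- _FALLBACK_CHAINS: Dict[str, List[str]] = {
--     "d4+inv": ["d4", "square", "none"],
--     "d4": ["square", "none"],
--     "square": ["none"],
--     "none": [],
-- }
--
-- def resolve_recommendation_to_mode(
--     recommendation: str,
--     available_modes: List[str],
-- ) -> Optional[str]:
--     """Resolve a recommendation string to a concrete correction mode.
--
--     Uses explicit mapping only. If preferred mode is unavailable,
--     falls back deterministically through the fallback chain.
--     Returns None only if no valid option exists.
--     """
--     preferred = _RECOMMENDATION_TO_MODE.get(recommendation)
--     if preferred is None:
--         return None
--
--     if preferred in available_modes: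
--         return preferred
--
--     # Walk fallback chain.
--     for fallback in _FALLBACK_CHAINS.get(preferred, []):
--         if fallback in available_modes:
--             return fallback
--
--     return None
-- ===== SOURCE B (Python) =====
-- _RECOMMENDATION_TO_MODE = {
--     "prefer_d4_projection": "d4",
--     "prefer_invariant_guided_modes": "d4+inv",
--     "enable_invariant_guidance": "d4+inv",
--     "reduce_projection_strength": "square",
--     "disable_correction": "none",
--     "switch_to_d4_or_invariant": "d4+inv",
--     "increase_structure_guidance": "d4+inv",
--     "skip_correction_or_expand_input": "none",
-- }
--
-- # Priority rank of each mode; A's fallback chain from a mode is exactly the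
-- # modes of strictly larger rank, tried in rank order, after the mode itself.
-- _ORDER = ["d4+inv", "d4", "square", "none"]
-- _RANK = {m: i for i, m in enumerate(_ORDER)}
--
-- def resolve_recommendation_to_mode(recommendation, available_modes):
--     preferred = _RECOMMENDATION_TO_MODE.get(recommendation)
--     if preferred is None:
--         return None
--     r = _RANK[preferred]
--     # Single pass over available_modes: pick the smallest rank >= r present.
--     best = len(_ORDER)  # sentinel: nothing usable found
--     for m in available_modes:
--         k = _RANK.get(m, len(_ORDER))
--         if r <= k < best:
--             best = k
--     return _ORDER[best] if best < len(_ORDER) else None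
-- ===== Notes on version B (the rewrite author's own statement) =====
-- stated objective: alternative
-- what changed: B drops the per-mode fallback-chain dict and its chain walk: it assigns each mode a priority rank and makes a single pass over available_modes keeping the minimum rank >= the preferred mode's rank, then maps that rank back to a mode; A instead tests membership of preferred and then scans its fallback chain against available_modes.
import Mathlib
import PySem

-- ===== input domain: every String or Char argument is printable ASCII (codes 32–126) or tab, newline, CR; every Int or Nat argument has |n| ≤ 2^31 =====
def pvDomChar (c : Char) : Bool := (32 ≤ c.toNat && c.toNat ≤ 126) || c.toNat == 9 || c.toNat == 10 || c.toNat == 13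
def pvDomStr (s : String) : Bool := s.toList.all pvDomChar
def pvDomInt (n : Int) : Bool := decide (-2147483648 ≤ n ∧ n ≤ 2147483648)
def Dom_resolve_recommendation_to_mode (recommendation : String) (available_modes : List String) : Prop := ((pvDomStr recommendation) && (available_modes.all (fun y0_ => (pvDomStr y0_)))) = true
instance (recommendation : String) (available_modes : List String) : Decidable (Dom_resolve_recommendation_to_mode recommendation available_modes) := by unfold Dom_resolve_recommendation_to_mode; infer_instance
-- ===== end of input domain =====

-- B replaces A's walk over a per-mode fallback chain by a single pass over
-- available_modes that keeps the minimum priority rank ≥ the preferred mode's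
-- rank (objective: alternative — a different traversal of the data).

-- ===== PORT A =====
def recMapA : PySem.Dict String String := PySem.Dict.ofList
  [("prefer_d4_projection", "d4"),
   ("prefer_invariant_guided_modes", "d4+inv"),
   ("enable_invariant_guidance", "d4+inv"),
   ("reduce_projection_strength", "square"),
   ("disable_correction", "none"),
   ("switch_to_d4_or_invariant", "d4+inv"),
   ("increase_structure_guidance", "d4+inv"),
   ("skip_correction_or_expand_input", "none")]

def fallbackChains : PySem.Dict String (List String) := PySem.Dict.ofList
  [("d4+inv", ["d4", "square", "none"]),
   ("d4", ["square", "none"]),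
   ("square", ["none"]),
   ("none", [])]

-- the 'for fallback in …: if fallback in available_modes: return fallback' loop of A
def chainLoopA (available_modes : List String) : List String → Option String
  | [] => none
  | f :: rest => if f ∈ available_modes then some f else chainLoopA available_modes rest

def resolve_recommendation_to_mode (recommendation : String) (available_modes : List String) : Option String :=
  match recMapA.get? recommendation with
  | none => none
  | some preferred =>
      if preferred ∈ available_modes then some preferred
      else chainLoopA available_modes ((fallbackChains.get? preferred).getD [])

-- ===== PORT B =====
def recMapB : PySem.Dict String String := PySem.Dict.ofList
  [("prefer_d4_projection", "d4"),
   ("prefer_invariant_guided_modes", "d4+inv"),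
   ("enable_invariant_guidance", "d4+inv"),
   ("reduce_projection_strength", "square"),
   ("disable_correction", "none"),
   ("switch_to_d4_or_invariant", "d4+inv"),
   ("increase_structure_guidance", "d4+inv"),
   ("skip_correction_or_expand_input", "none")]

def orderB : List String := ["d4+inv", "d4", "square", "none"]

def rankMap : PySem.Dict String Nat := PySem.Dict.ofList
  [("d4+inv", 0), ("d4", 1), ("square", 2), ("none", 3)]

-- the loop body: 'k = _RANK.get(m, 4); if r <= k < best: best = k'
def bestStep (r : Nat) (best : Nat) (m : String) : Nat :=
  if r ≤ rankMap.getD m 4 ∧ rankMap.getD m 4 < best then rankMap.getD m 4 else best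

def resolve_recommendation_to_mode_alt (recommendation : String) (available_modes : List String) : Option String :=
  match recMapB.get? recommendation with
  | none => none
  | some preferred =>
      match rankMap.get? preferred with
      | none => none  -- Python's _RANK[preferred] would raise; unreachable: every mapped mode has a rank
      | some r =>
          let best := available_modes.foldl (bestStep r) 4
          if best < 4 then some (orderB.getD best "") else none

-- ===== PRECONDITION & SPEC =====
def Spec_resolve_recommendation_to_mode (recommendation : String) (available_modes : List String) (out : Option String) : Prop := out = resolve_recommendation_to_mode_alt recommendation available_modes
instance (recommendation : String) (available_modes : List String) (out : Option String) : Decidable (Spec_resolve_recommendation_to_mode recommendation available_modes out) := by unfold Spec_resolve_recommendation_to_mode; infer_instance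

-- ===== CLAIM (what is proved, stated in full; the proofs are below) =====
def Claim_equal_resolve_recommendation_to_mode : Prop := ∀ (recommendation : String) (available_modes : List String), Dom_resolve_recommendation_to_mode recommendation available_modes → Spec_resolve_recommendation_to_mode recommendation available_modes (resolve_recommendation_to_mode recommendation available_modes)

-- ===== LEMMAS AND PROOFS =====

theorem recMapB_eq_recMapA : recMapB = recMapA := rfl

-- rankMap.getD as an if-chain over the four mode strings
theorem rank_eval (m : String) :
    rankMap.getD m 4 =
      if m = "d4+inv" then 0 else if m = "d4" then 1
      else if m = "square" then 2 else if m = "none" then 3 else 4 := by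
  by_cases h0 : m = "d4+inv"
  · subst h0; decide
  by_cases h1 : m = "d4"
  · subst h1; decide
  by_cases h2 : m = "square"
  · subst h2; decide
  by_cases h3 : m = "none"
  · subst h3; decide
  simp only [h0, h1, h2, h3, if_false]
  have hc : rankMap.contains m = false := by
    have hk : rankMap.items = [("d4+inv", 0), ("d4", 1), ("square", 2), ("none", 3)] := rfl
    simp [PySem.Dict.contains, hk, Ne.symm h0, Ne.symm h1, Ne.symm h2, Ne.symm h3]
  exact PySem.Dict.getD_of_not_contains rankMap 4 hc

theorem bestStep_le (r b : Nat) (m : String) : bestStep r b m ≤ max b 4 := by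
  unfold bestStep; split_ifs with h <;> omega

-- the fold from any accumulator b ≤ 4 is min b (fold from 4)
theorem fold_min (r : Nat) (am : List String) :
    ∀ b, b ≤ 4 → am.foldl (bestStep r) b = min b (am.foldl (bestStep r) 4) := by
  induction am with
  | nil => intro b hb; simp [List.foldl]; omega
  | cons m t ih =>
      intro b hb
      have hsb : bestStep r b m ≤ 4 := by
        have := bestStep_le r b m; omega
      have hs4 : bestStep r 4 m ≤ 4 := by
        have := bestStep_le r 4 m; omega
      have hbm : bestStep r b m = min b (bestStep r 4 m) := by
        unfold bestStep; split_ifs <;> omega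
      simp only [List.foldl_cons]
      rw [ih _ hsb, ih _ hs4, hbm]
      omega

-- membership rank: if r ≤ j and the j-th mode is available then j, else 4
def mrank (r j : Nat) (s : String) (am : List String) : Nat :=
  if r ≤ j ∧ s ∈ am then j else 4

-- the fold equals the min over the four modes of their membership ranks
set_option maxHeartbeats 1000000 in
theorem fold_char (r : Nat) (am : List String) :
    am.foldl (bestStep r) 4 =
      min (mrank r 0 "d4+inv" am)
        (min (mrank r 1 "d4" am) (min (mrank r 2 "square" am) (mrank r 3 "none" am))) := by
  induction am with
  | nil => simp [mrank]
  | cons m t ih =>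
      have hs4 : bestStep r 4 m ≤ 4 := by
        have := bestStep_le r 4 m; omega
      simp only [List.foldl_cons]
      rw [fold_min r t _ hs4, ih]
      by_cases h0 : m = "d4+inv"
      · subst h0
        have hk : rankMap.getD "d4+inv" 4 = 0 := by decide
        simp only [bestStep, hk, mrank, List.mem_cons]
        simp only [show ("d4+inv" : String) = "d4+inv" ↔ True from by simp,
          show ("d4" : String) = "d4+inv" ↔ False from by simp,
          show ("square" : String) = "d4+inv" ↔ False from by simp,
          show ("none" : String) = "d4+inv" ↔ False from by simp,
          true_or, false_or, and_true]
        split_ifs <;> omega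
      by_cases h1 : m = "d4"
      · subst h1
        have hk : rankMap.getD "d4" 4 = 1 := by decide
        simp only [bestStep, hk, mrank, List.mem_cons]
        simp only [show ("d4+inv" : String) = "d4" ↔ False from by simp,
          show ("d4" : String) = "d4" ↔ True from by simp,
          show ("square" : String) = "d4" ↔ False from by simp,
          show ("none" : String) = "d4" ↔ False from by simp,
          true_or, false_or, and_true]
        split_ifs <;> omega
      by_cases h2 : m = "square"
      · subst h2
        have hk : rankMap.getD "square" 4 = 2 := by decide
        simp only [bestStep, hk, mrank, List.mem_cons]
        simp only [show ("d4+inv" : String) = "square" ↔ False from by simp,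
          show ("d4" : String) = "square" ↔ False from by simp,
          show ("square" : String) = "square" ↔ True from by simp,
          show ("none" : String) = "square" ↔ False from by simp,
          true_or, false_or, and_true]
        split_ifs <;> omega
      by_cases h3 : m = "none"
      · subst h3
        have hk : rankMap.getD "none" 4 = 3 := by decide
        simp only [bestStep, hk, mrank, List.mem_cons]
        simp only [show ("d4+inv" : String) = "none" ↔ False from by simp,
          show ("d4" : String) = "none" ↔ False from by simp,
          show ("square" : String) = "none" ↔ False from by simp,
          show ("none" : String) = "none" ↔ True from by simp,
          true_or, false_or, and_true]
        split_ifs <;> omega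
      · have hr : rankMap.getD m 4 = 4 := by
          rw [rank_eval]; simp [h0, h1, h2, h3]
        simp only [bestStep, hr, mrank, List.mem_cons,
          iff_false_intro (Ne.symm h0), iff_false_intro (Ne.symm h1),
          iff_false_intro (Ne.symm h2), iff_false_intro (Ne.symm h3), false_or]
        split_ifs <;> omega

-- A = B once the preferred mode is fixed to one of the four concrete modes
set_option maxHeartbeats 1600000 in
theorem branch_eq (am : List String) (p : String)
    (hp : p = "d4+inv" ∨ p = "d4" ∨ p = "square" ∨ p = "none") :
    (if p ∈ am then some p else chainLoopA am ((fallbackChains.get? p).getD []))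
      = match rankMap.get? p with
        | none => none
        | some r =>
            if am.foldl (bestStep r) 4 < 4 then
              some (orderB.getD (am.foldl (bestStep r) 4) "") else none := by
  rcases hp with h | h | h | h <;> subst h <;>
  [ (rw [show rankMap.get? "d4+inv" = some 0 from rfl]);
    (rw [show rankMap.get? "d4" = some 1 from rfl]);
    (rw [show rankMap.get? "square" = some 2 from rfl]);
    (rw [show rankMap.get? "none" = some 3 from rfl])] <;>
  simp only [fold_char, mrank] <;>
  by_cases h0 : "d4+inv" ∈ am <;> by_cases h1 : "d4" ∈ am <;>
    by_cases h2 : "square" ∈ am <;> by_cases h3 : "none" ∈ am <;>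
  simp [h0, h1, h2, h3, chainLoopA, orderB, List.getD,
    show (fallbackChains.get? "d4+inv").getD [] = ["d4", "square", "none"] from rfl,
    show (fallbackChains.get? "d4").getD [] = ["square", "none"] from rfl,
    show (fallbackChains.get? "square").getD [] = ["none"] from rfl,
    show (fallbackChains.get? "none").getD [] = [] from rfl]

theorem get?_recMapA_mem (r p : String) (h : recMapA.get? r = some p) :
    p = "d4+inv" ∨ p = "d4" ∨ p = "square" ∨ p = "none" := by
  have hm : (r, p) ∈ recMapA.items := PySem.Dict.mem_items_of_get?_eq_some recMapA h
  revert hm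
  show (r, p) ∈ recMapA.items → _
  simp [show recMapA.items =
    [("prefer_d4_projection", "d4"),
     ("prefer_invariant_guided_modes", "d4+inv"),
     ("enable_invariant_guidance", "d4+inv"),
     ("reduce_projection_strength", "square"),
     ("disable_correction", "none"),
     ("switch_to_d4_or_invariant", "d4+inv"),
     ("increase_structure_guidance", "d4+inv"),
     ("skip_correction_or_expand_input", "none")] from rfl]
  rintro (⟨-, h⟩ | ⟨-, h⟩ | ⟨-, h⟩ | ⟨-, h⟩ | ⟨-, h⟩ | ⟨-, h⟩ | ⟨-, h⟩ | ⟨-, h⟩) <;> subst h <;> tauto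

-- ===== VERDICT (by name: the statement is the Claim_ definition above) =====
theorem resolve_recommendation_to_mode_spec : Claim_equal_resolve_recommendation_to_mode := by
  intro recommendation available_modes _
  unfold Spec_resolve_recommendation_to_mode resolve_recommendation_to_mode resolve_recommendation_to_mode_alt
  rw [recMapB_eq_recMapA]
  cases h : recMapA.get? recommendation with
  | none => rfl
  | some p => exact branch_eq available_modes p (get?_recMapA_mem recommendation p h)
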